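-- pv_equiv track=rewrite | github.com/Ascendral/KlomboAGI | klomboagi/reasoning/arc_lines.py | _connect_pairs_v
-- ===== SOURCE A (Python) =====
-- def _connect_pairs_v(g,bg):
--     R,C=len(g),len(g[0]); r=[row[:] for row in g]
--     for c in range(C):
--         seen={}
--         for i in range(R):
--             if g[i][c]!=bg:
--                 color=g[i][c]
--                 if color in seen:
--                     for i2 in range(seen[color]+1,i):
--                         if r[i2][c]==bg: r[i2][c]=color
--                 seen[color]=i
--     return r
-- ===== SOURCE B (Python) =====
-- def _connect_pairs_v(g, bg):
--     C = len(g[0])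
--     r = [row[:] for row in g]
--     for c in range(C):
--         # index: color -> ascending list of row positions in this column
--         idx = {}
--         for i, row in enumerate(g):
--             v = row[c]
--             if v != bg:
--                 idx.setdefault(v, []).append(i)
--         # one fill interval per consecutive pair of positions, tagged by end row
--         intervals = []
--         for v, ps in idx.items():
--             for a, b in zip(ps, ps[1:]):
--                 intervals.append((b, a, v))
--         # apply in increasing end-row order, writing only over background
--         intervals.sort(key=lambda t: t[0])
--         for b, a, v in intervals:
--             for i in range(a + 1, b):
--                 if r[i][c] == bg:
--                     r[i][c] = v
--     return r
-- ===== Notes on version B (the rewrite author's own statement) =====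
-- stated objective: alternative
-- what changed: A interleaves fill work into a single last-occurrence scan per column; B instead builds a color-to-positions index per column in one pass, derives one fill interval per consecutive position pair, and applies the intervals sorted by end row.
import Mathlib
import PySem

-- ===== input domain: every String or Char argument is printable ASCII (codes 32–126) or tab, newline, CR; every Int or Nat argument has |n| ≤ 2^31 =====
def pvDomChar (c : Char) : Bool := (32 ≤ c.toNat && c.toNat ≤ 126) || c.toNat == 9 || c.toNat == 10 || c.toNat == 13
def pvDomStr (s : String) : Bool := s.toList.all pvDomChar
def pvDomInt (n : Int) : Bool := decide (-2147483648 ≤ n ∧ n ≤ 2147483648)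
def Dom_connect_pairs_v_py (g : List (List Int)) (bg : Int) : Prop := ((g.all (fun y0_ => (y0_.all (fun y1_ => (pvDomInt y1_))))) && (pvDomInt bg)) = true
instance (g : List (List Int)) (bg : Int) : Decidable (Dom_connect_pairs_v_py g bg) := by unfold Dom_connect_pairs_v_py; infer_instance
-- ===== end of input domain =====

-- B replaces A's interleaved last-occurrence scan by a per-column color→positions index whose
-- consecutive-pair fill intervals are applied sorted by end row (objective: alternative decomposition).

-- ===== PORT A =====
-- r[i][c]  (indices produced by range(); always in range on Pre_ inputs, default out of range)
def pvGetAt (r : List (List Int)) (i c : Int) : Int := (r.getD i.toNat []).getD c.toNat 0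

-- r[i][c] = v
def pvSetAt (r : List (List Int)) (i c : Int) (v : Int) : List (List Int) :=
  r.modify i.toNat (fun row => row.set c.toNat v)

-- the fill loop both Pythons contain, over one interval t = (end, start, color):
-- for i2 in range(start+1, end): if r[i2][c]==bg: r[i2][c]=color
def pvApply (bg c : Int) (r : List (List Int)) (t : Int × Int × Int) : List (List Int) :=
  (PySem.List.pyRange (t.2.1 + 1) t.1 1).foldl
    (fun r i2 => if pvGetAt r i2 c == bg then pvSetAt r i2 c t.2.2 else r) r

def connect_pairs_v_py (g : List (List Int)) (bg : Int) : List (List Int) :=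
  let R : Int := g.length
  let C : Int := (g.headD []).length
  let r0 := g.map (fun row => row)
  (PySem.List.pyRange 0 C 1).foldl (fun r c =>
    ((PySem.List.pyRange 0 R 1).foldl
      (fun (st : PySem.Dict Int Int × List (List Int)) i =>
        if pvGetAt g i c != bg then
          let color := pvGetAt g i c
          let r' :=
            match st.1.get? color with
            | some j => pvApply bg c st.2 (i, j, color)
            | none => st.2
          (st.1.insert color i, r')
        else st)
      (PySem.Dict.empty, r)).2) r0

-- ===== PORT B =====
def connect_pairs_v_py_alt (g : List (List Int)) (bg : Int) : List (List Int) :=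
  let C : Int := (g.headD []).length
  let r0 := g.map (fun row => row)
  (PySem.List.pyRange 0 C 1).foldl (fun r c =>
    let idx : PySem.Dict Int (List Int) :=
      (PySem.List.enumerate g).foldl
        (fun idx p =>
          let v := p.2.getD c.toNat 0
          if v != bg then idx.modify v [] (· ++ [p.1]) else idx)
        PySem.Dict.empty
    let ints0 : List (Int × Int × Int) :=
      idx.items.foldl
        (fun acc pv => acc ++ ((pv.2.zip pv.2.tail).map (fun ab => (ab.2, ab.1, pv.1)))) []
    let intervals := PySem.List.sorted ints0 (fun t => t.1) false
    intervals.foldl (pvApply bg c) r) r0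

-- ===== PRECONDITION & SPEC =====
-- Pre_ excludes exactly the inputs where Python A raises IndexError: the empty grid (g[0])
-- and grids with a row shorter than the first row (g[i][c] / r[i2][c] for c < len(g[0])).
def Pre_connect_pairs_v_py (g : List (List Int)) (bg : Int) : Prop :=
  g ≠ [] ∧ ∀ row ∈ g, (g.headD []).length ≤ row.length
instance (g : List (List Int)) (bg : Int) : Decidable (Pre_connect_pairs_v_py g bg) := by
  unfold Pre_connect_pairs_v_py; infer_instance

def pvWitness_connect_pairs_v_py : List (List Int) × Int := ([[1, 0, 2], [0, 0, 0], [1, 0, 2]], 0)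

def Spec_connect_pairs_v_py (g : List (List Int)) (bg : Int) (out : List (List Int)) : Prop := out = connect_pairs_v_py_alt g bg
instance (g : List (List Int)) (bg : Int) (out : List (List Int)) : Decidable (Spec_connect_pairs_v_py g bg out) := by unfold Spec_connect_pairs_v_py; infer_instance

-- ===== CLAIM (what is proved, stated in full; the proofs are below) =====
def Claim_equal_connect_pairs_v_py : Prop := ∀ (g : List (List Int)) (bg : Int), Dom_connect_pairs_v_py g bg → Pre_connect_pairs_v_py g bg → Spec_connect_pairs_v_py g bg (connect_pairs_v_py g bg)

-- ===== LEMMAS AND PROOFS =====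

-- the (row index, cell value) pairs of column c
def pvVals (g : List (List Int)) (c : Int) : List (Int × Int) :=
  (PySem.List.enumerate g).map (fun p => (p.1, p.2.getD c.toNat 0))

-- A's scan step, rephrased over a (position, value) pair
def pvStepA (bg c : Int) (st : PySem.Dict Int Int × List (List Int)) (p : Int × Int) :
    PySem.Dict Int Int × List (List Int) :=
  if p.2 != bg then
    (st.1.insert p.2 p.1,
     match st.1.get? p.2 with
     | some j => pvApply bg c st.2 (p.1, j, p.2)
     | none => st.2)
  else st

-- the intervals A's scan emits, in scan (= increasing end-row) order
def pvEmiss (bg : Int) : List (Int × Int) → PySem.Dict Int Int → List (Int × Int × Int)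
  | [], _ => []
  | p :: ps, seen =>
    if p.2 != bg then
      (match seen.get? p.2 with | some j => [(p.1, j, p.2)] | none => []) ++
        pvEmiss bg ps (seen.insert p.2 p.1)
    else pvEmiss bg ps seen

-- consecutive-pair intervals of a position list, tagged with color v
def pvPairsOf (v : Int) (l : List Int) : List (Int × Int × Int) :=
  (l.zip l.tail).map (fun ab => (ab.2, ab.1, v))

-- A's inner fold over range(R) is the pvStepA fold over the column pairs
lemma pvA_inner (g : List (List Int)) (bg c : Int) (st0 : PySem.Dict Int Int × List (List Int)) :
    (PySem.List.pyRange 0 (g.length : Int) 1).foldl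
      (fun (st : PySem.Dict Int Int × List (List Int)) i =>
        if pvGetAt g i c != bg then
          let color := pvGetAt g i c
          let r' :=
            match st.1.get? color with
            | some j => pvApply bg c st.2 (i, j, color)
            | none => st.2
          (st.1.insert color i, r')
        else st) st0
      = (pvVals g c).foldl (pvStepA bg c) st0 := by
  have h1 : PySem.List.pyRange 0 (g.length : Int) 1 = (PySem.List.enumerate g).map (·.1) := by
    rw [PySem.List.map_fst_enumerate]; norm_num
  rw [h1, List.foldl_map]
  unfold pvVals
  rw [List.foldl_map]
  apply PySem.List.foldl_congr_mem
  intro st p hp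
  obtain ⟨k, hk, rfl⟩ := (PySem.List.mem_enumerate_iff _ _ _).1 hp
  have hg : pvGetAt g ((0 : Int) + k) c = (g[k]).getD c.toNat 0 := by
    simp [pvGetAt, List.getD_eq_getElem?_getD, hk]
  simp only [pvStepA, hg]

-- the scan's grid component is the fold of pvApply over the emitted intervals
lemma pvA_scan_eq_apply_emiss (bg c : Int) (ps : List (Int × Int))
    (seen : PySem.Dict Int Int) (r : List (List Int)) :
    (ps.foldl (pvStepA bg c) (seen, r)).2 = (pvEmiss bg ps seen).foldl (pvApply bg c) r := by
  induction ps generalizing seen r with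
  | nil => rfl
  | cons p ps ih =>
    by_cases h : (p.2 != bg) = true
    · cases hs : seen.get? p.2 with
      | some j =>
        simp only [List.foldl_cons, pvEmiss, pvStepA, h, hs, if_true, List.cons_append,
          List.nil_append]
        exact ih _ _
      | none =>
        simp only [List.foldl_cons, pvEmiss, pvStepA, h, hs, if_true, List.nil_append]
        exact ih _ _
    · simp only [List.foldl_cons, pvEmiss, pvStepA, h, if_false, Bool.false_eq_true]
      exact ih _ _

-- per color, the emitted intervals are the consecutive pairs of its position list
lemma pvEmiss_filter (bg v : Int) (hv : v ≠ bg) (ps : List (Int × Int)) (seen : PySem.Dict Int Int) :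
    (pvEmiss bg ps seen).filter (fun t => t.2.2 == v)
      = pvPairsOf v ((seen.get? v).toList ++ (ps.filter (fun p => p.2 == v)).map (·.1)) := by
  induction ps generalizing seen with
  | nil => cases hs : seen.get? v <;> simp [pvEmiss, pvPairsOf]
  | cons p ps ih =>
    by_cases h : (p.2 != bg) = true
    · by_cases hpv : p.2 = v
      · subst hpv
        cases hs : seen.get? p.2 with
        | some j =>
          simp only [pvEmiss, h, if_true, hs, List.cons_append, List.nil_append,
            List.filter_cons]
          rw [ih, PySem.Dict.get?_insert_self]
          simp [pvPairsOf]
        | none =>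
          simp only [pvEmiss, h, if_true, hs, List.nil_append, List.filter_cons]
          rw [ih, PySem.Dict.get?_insert_self]
          simp [pvPairsOf]
      · have hne : (p.2 == v) = false := by simp [hpv]
        cases hs : seen.get? p.2 with
        | some j =>
          simp only [pvEmiss, h, if_true, hs, List.cons_append, List.nil_append,
            List.filter_cons, hne, Bool.false_eq_true, if_false]
          have hq : v ≠ p.2 := fun hvv => hpv hvv.symm
          rw [ih]
          simp [PySem.Dict.get?_insert_of_ne, hq]
        | none =>
          simp only [pvEmiss, h, if_true, hs, List.nil_append, List.filter_cons, hne]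
          have hq : v ≠ p.2 := fun hvv => hpv hvv.symm
          rw [ih]
          simp [PySem.Dict.get?_insert_of_ne, hq]
    · have hbg : p.2 = bg := by simpa using h
      have hne : (p.2 == v) = false := by simp [hbg, Ne.symm hv]
      simp only [pvEmiss, h, Bool.false_eq_true, if_false, List.filter_cons, hne]
      exact ih seen

-- every emitted interval ends at a scanned non-background cell
lemma pvEmiss_mem (bg : Int) (ps : List (Int × Int)) (seen : PySem.Dict Int Int)
    (t : Int × Int × Int) (ht : t ∈ pvEmiss bg ps seen) :
    ∃ p ∈ ps, t.1 = p.1 ∧ t.2.2 = p.2 ∧ (p.2 != bg) = true := by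
  induction ps generalizing seen with
  | nil => simp [pvEmiss] at ht
  | cons p ps ih =>
    by_cases h : (p.2 != bg) = true
    · simp only [pvEmiss, h, if_true, List.mem_append] at ht
      rcases ht with ht | ht
      · refine ⟨p, List.mem_cons_self, ?_⟩
        cases hs : seen.get? p.2 <;> simp [hs] at ht
        simp [ht, h]
      · obtain ⟨q, hq, hrest⟩ := ih _ ht
        exact ⟨q, List.mem_cons_of_mem _ hq, hrest⟩
    · simp only [pvEmiss, h, Bool.false_eq_true, if_false] at ht
      obtain ⟨q, hq, hrest⟩ := ih _ ht
      exact ⟨q, List.mem_cons_of_mem _ hq, hrest⟩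

-- emitted intervals have strictly increasing end rows
lemma pvEmiss_pairwise (bg : Int) (ps : List (Int × Int)) (seen : PySem.Dict Int Int)
    (hps : ps.Pairwise (fun p q => p.1 < q.1)) :
    (pvEmiss bg ps seen).Pairwise (fun s t => s.1 < t.1) := by
  induction ps generalizing seen with
  | nil => simp [pvEmiss]
  | cons p ps ih =>
    rw [List.pairwise_cons] at hps
    by_cases h : (p.2 != bg) = true
    · simp only [pvEmiss, h, if_true]
      rw [List.pairwise_append]
      refine ⟨?_, ih _ hps.2, ?_⟩
      · cases seen.get? p.2 <;> simp
      · intro a ha b hb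
        obtain ⟨q, hq, hb1, _⟩ := pvEmiss_mem bg ps _ b hb
        have ha1 : a.1 = p.1 := by
          cases hs : seen.get? p.2 <;> simp [hs] at ha
          simp [ha]
        rw [ha1, hb1]
        exact hps.1 q hq
    · simp only [pvEmiss, h, Bool.false_eq_true, if_false]
      exact ih _ hps.2

-- a list each of whose elements' color lies in the nodup list ks is a permutation of its color classes
lemma pvPartition (ks : List Int) (xs : List (Int × Int × Int)) (hnd : ks.Nodup)
    (hcov : ∀ t ∈ xs, t.2.2 ∈ ks) :
    xs.Perm (ks.flatMap (fun k => xs.filter (fun t => t.2.2 == k))) := by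
  induction ks generalizing xs with
  | nil =>
    cases xs with
    | nil => exact List.Perm.refl _
    | cons t ts => exact absurd (hcov t List.mem_cons_self) (by simp)
  | cons k ks ih =>
    have hperm := List.filter_append_perm (fun t => t.2.2 == k) xs
    have hxs' : ∀ t ∈ xs.filter (fun t => !(t.2.2 == k)), t.2.2 ∈ ks := by
      intro t ht
      rw [List.mem_filter] at ht
      rcases List.mem_cons.1 (hcov t ht.1) with h1 | h1
      · simp [h1] at ht
      · exact h1
    have ih' := ih (xs.filter (fun t => !(t.2.2 == k))) (List.Nodup.of_cons hnd) hxs'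
    have hcong : ks.flatMap (fun k' => (xs.filter (fun t => !(t.2.2 == k))).filter
          (fun t => t.2.2 == k'))
        = ks.flatMap (fun k' => xs.filter (fun t => t.2.2 == k')) := by
      apply List.flatMap_congr
      intro k' hk'
      have hkk : k' ≠ k := by rintro rfl; exact (List.nodup_cons.1 hnd).1 hk'
      rw [List.filter_filter]
      apply List.filter_congr
      intro t ht
      by_cases h : t.2.2 = k' <;> simp [h, hkk]
    rw [hcong] at ih'
    refine hperm.symm.trans ?_
    rw [List.flatMap_cons]
    exact List.Perm.append_left _ ih'

-- the per-column steps of the two ports agree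
lemma pvCol_eq (g : List (List Int)) (bg : Int) (r : List (List Int)) (c : Int) :
    ((PySem.List.pyRange 0 (g.length : Int) 1).foldl
      (fun (st : PySem.Dict Int Int × List (List Int)) i =>
        if pvGetAt g i c != bg then
          let color := pvGetAt g i c
          let r' :=
            match st.1.get? color with
            | some j => pvApply bg c st.2 (i, j, color)
            | none => st.2
          (st.1.insert color i, r')
        else st)
      (PySem.Dict.empty, r)).2
    = (PySem.List.sorted
        ((((PySem.List.enumerate g).foldl
            (fun (idx : PySem.Dict Int (List Int)) p =>
              let v := p.2.getD c.toNat 0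
              if v != bg then idx.modify v [] (· ++ [p.1]) else idx)
            PySem.Dict.empty).items).foldl
          (fun acc pv => acc ++ ((pv.2.zip pv.2.tail).map (fun ab => (ab.2, ab.1, pv.1)))) [])
        (fun t => t.1) false).foldl (pvApply bg c) r := by
  rw [pvA_inner, pvA_scan_eq_apply_emiss]
  -- name the pieces of B's column step
  set F := fun (d : PySem.Dict Int (List Int)) (p : Int × Int) => d.modify p.2 [] (· ++ [p.1])
    with hF
  set filt := (pvVals g c).filter (fun p => p.2 != bg) with hfilt
  have hidx : ((PySem.List.enumerate g).foldl
      (fun (idx : PySem.Dict Int (List Int)) p =>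
        let v := p.2.getD c.toNat 0
        if v != bg then idx.modify v [] (· ++ [p.1]) else idx)
      PySem.Dict.empty)
      = filt.foldl F PySem.Dict.empty := by
    rw [hfilt, ← PySem.List.foldl_if_eq_foldl_filter]
    unfold pvVals
    rw [List.foldl_map]
  rw [hidx]
  set idx := filt.foldl F PySem.Dict.empty with hidxd
  set E := pvEmiss bg (pvVals g c) PySem.Dict.empty with hE
  have hswap : idx = (filt.map Prod.swap).foldl
      (fun (d : PySem.Dict Int (List Int)) q => d.modify q.1 [] (· ++ [q.2]))
      PySem.Dict.empty := by
    rw [List.foldl_map]; rfl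
  have hgetD : ∀ v : Int, idx.getD v [] = (filt.filter (fun p => p.2 == v)).map (·.1) := by
    intro v
    rw [hswap, PySem.Dict.getD_foldl_modify_append, List.filter_map]
    simp [Function.comp_def]
  have hkeys : idx.keys = PySem.Set.ofList (filt.map (fun p => p.2)) := by
    rw [hswap, PySem.Dict.keys_foldl_modify_key]
    have hu : ∀ xs : List Int, PySem.Set.update [] xs = PySem.Set.ofList xs := fun _ => rfl
    rw [show (PySem.Dict.empty : PySem.Dict Int (List Int)).keys = [] from rfl, hu]
    congr 1
    simp [Function.comp_def]
  have hnodupk : idx.keys.Nodup := by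
    rw [hkeys]; exact PySem.Set.nodup_ofList _
  have hitems : idx.items = idx.keys.map (fun k => (k, idx.getD k [])) :=
    PySem.Dict.items_eq_map_keys idx hnodupk []
  have hkbg : ∀ k ∈ idx.keys, k ≠ bg := by
    intro k hk
    rw [hkeys] at hk
    obtain ⟨p, hp, rfl⟩ := List.mem_map.1 ((PySem.Set.mem_ofList _ _).1 hk)
    have := (List.mem_filter.1 hp).2
    simpa using this
  have hfiltk : ∀ k ∈ idx.keys, idx.getD k [] = ((pvVals g c).filter
      (fun p => p.2 == k)).map (·.1) := by
    intro k hk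
    rw [hgetD k, hfilt, List.filter_filter]
    congr 1
    apply List.filter_congr
    intro p _
    by_cases h : p.2 = k
    · have hps : p.2 ≠ bg := by rw [h]; exact hkbg k hk
      simp [h]
      exact hkbg k hk
    · simp [h]
  have hone : ∀ k ∈ idx.keys, pvPairsOf k (idx.getD k []) = E.filter (fun t => t.2.2 == k) := by
    intro k hk
    rw [hE, pvEmiss_filter bg k (hkbg k hk), hfiltk k hk]
    rfl
  have hints0 : (idx.items.foldl
      (fun acc pv => acc ++ ((pv.2.zip pv.2.tail).map (fun ab => (ab.2, ab.1, pv.1)))) [])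
      = idx.keys.flatMap (fun k => E.filter (fun t => t.2.2 == k)) := by
    rw [PySem.List.foldl_append_eq_flatMap, List.nil_append, hitems, List.flatMap_map]
    apply List.flatMap_congr
    intro k hk
    exact hone k hk
  rw [hints0]
  have hcov : ∀ t ∈ E, t.2.2 ∈ idx.keys := by
    intro t ht
    obtain ⟨p, hp, _, h2, h3⟩ := pvEmiss_mem bg _ _ t ht
    rw [hkeys]
    refine (PySem.Set.mem_ofList _ _).2 (List.mem_map.2 ⟨p, ?_, h2.symm⟩)
    rw [hfilt, List.mem_filter]
    exact ⟨hp, h3⟩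
  have hperm : E.Perm (idx.keys.flatMap (fun k => E.filter (fun t => t.2.2 == k))) :=
    pvPartition idx.keys E hnodupk hcov
  have hpair : E.Pairwise (fun s t => s.1 < t.1) := by
    refine pvEmiss_pairwise bg _ _ ?_
    unfold pvVals
    rw [List.pairwise_map]
    exact PySem.List.pairwise_lt_enumerate g 0
  have hs : PySem.List.sorted
      (idx.keys.flatMap (fun k => E.filter (fun t => t.2.2 == k)))
      (fun t : Int × Int × Int => t.1) false = E :=
    PySem.List.sorted_eq_of_perm_of_pairwise_lt _ _ _ hperm hpair
  rw [hs]

-- ===== VERDICT (by name: the statement is the Claim_ definition above) =====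
theorem connect_pairs_v_py_spec : Claim_equal_connect_pairs_v_py := by
  intro g bg _ _
  unfold Spec_connect_pairs_v_py connect_pairs_v_py connect_pairs_v_py_alt
  apply PySem.List.foldl_congr_mem
  intro r c _
  exact pvCol_eq g bg r c
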